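-- pv_equiv track=rewrite | github.com/nassimmatouk/Advenced_algo | implementation/tsp_mst_approach_prim.py | preorder_traversal
-- ===== SOURCE A (Python) =====
-- def preorder_traversal(mst, start):
--     from collections import defaultdict
--
--     graph = defaultdict(list)  # Create a graph from MST edges
--     for u, v, cost in mst:
--         graph[u].append(v)
--         graph[v].append(u)
--
--     visited = set()  # Keep track of visited nodes
--     path = []  # Store the path
--
--     def dfs(node):
--         visited.add(node)  # Mark node as visited
--         path.append(node)  # Add node to the path
--         for neighbor in graph[node]:
--             if neighbor not in visited:
--                 dfs(neighbor)  # Recursively visit neighbors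
--
--     dfs(start)
--     return path  # Return the path in preorder
-- ===== SOURCE B (Python) =====
-- def preorder_traversal(mst, start):
--     from collections import defaultdict
--
--     graph = defaultdict(list)  # Create a graph from MST edges
--     for u, v, cost in mst:
--         graph[u].append(v)
--         graph[v].append(u)
--
--     visited = set()
--     path = []
--     stack = [start]  # Iterative DFS: explicit stack instead of recursion
--     while stack:
--         node = stack.pop()
--         if node in visited:
--             continue
--         visited.add(node)
--         path.append(node)
--         # Push neighbors reversed so the first neighbor is popped first,
--         # reproducing the recursive preorder exactly (visited checked at pop time).
--         stack.extend(reversed(graph[node]))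
--     return path
-- ===== Notes on version B (the rewrite author's own statement) =====
-- stated objective: alternative
-- what changed: A's recursive dfs helper (call stack, preorder append per call) is replaced by an iterative DFS with an explicit stack: pop a node, skip if visited, else mark/append it and push its neighbors in reversed order so the recursive preorder is reproduced exactly; the adjacency-list construction is unchanged.
import Mathlib
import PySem

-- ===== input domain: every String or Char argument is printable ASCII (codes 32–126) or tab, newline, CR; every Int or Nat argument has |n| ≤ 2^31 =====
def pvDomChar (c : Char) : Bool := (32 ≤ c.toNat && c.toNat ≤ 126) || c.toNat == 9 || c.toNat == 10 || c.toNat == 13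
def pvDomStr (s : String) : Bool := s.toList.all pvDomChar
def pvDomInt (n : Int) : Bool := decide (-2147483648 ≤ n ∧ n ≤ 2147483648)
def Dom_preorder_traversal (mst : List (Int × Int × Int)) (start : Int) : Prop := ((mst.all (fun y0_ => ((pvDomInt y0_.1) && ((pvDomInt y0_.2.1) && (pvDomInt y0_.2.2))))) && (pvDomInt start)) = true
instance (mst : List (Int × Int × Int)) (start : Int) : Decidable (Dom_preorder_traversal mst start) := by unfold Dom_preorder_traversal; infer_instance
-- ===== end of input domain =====

-- B replaces A's recursive dfs by an iterative explicit-stack DFS (pop-time visited check,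
-- neighbors pushed reversed), same adjacency construction; return values proved equal.

-- ===== PORT A =====
-- graph = defaultdict(list); for u, v, cost in mst: graph[u].append(v); graph[v].append(u)
def pvBuildGraph (mst : List (Int × Int × Int)) : PySem.Dict Int (List Int) :=
  mst.foldl (fun g e => (g.modify e.1 [] (· ++ [e.2.1])).modify e.2.1 [] (· ++ [e.1]))
    PySem.Dict.empty

-- A's recursive dfs (visited.add; path.append; guarded recursion over graph[node]),
-- fueled for totality: the fuel 2*|mst|+2 used below strictly exceeds the recursion depth
-- (bounded by the number of distinct nodes ≤ 2*|mst|+1), so the 0 branch is never reached.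
mutual
def pvDfsA (g : PySem.Dict Int (List Int)) (f : Nat) (node : Int)
    (v : PySem.Set Int) (p : List Int) : PySem.Set Int × List Int :=
  match f with
  | 0 => (v, p)
  | f' + 1 => pvDfsL g f' (PySem.Set.add v node) (p ++ [node]) (g.getD node [])
termination_by (f, 0)

def pvDfsL (g : PySem.Dict Int (List Int)) (f : Nat)
    (v : PySem.Set Int) (p : List Int) (ns : List Int) : PySem.Set Int × List Int :=
  match ns with
  | [] => (v, p)
  | nb :: ns' =>
    if PySem.Set.contains v nb then pvDfsL g f v p ns'
    else
      let r := pvDfsA g f nb v p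
      pvDfsL g f r.1 r.2 ns'
termination_by (f, ns.length + 1)
end

def preorder_traversal (mst : List (Int × Int × Int)) (start : Int) : List Int :=
  let graph := pvBuildGraph mst
  (pvDfsA graph (2 * mst.length + 2) start PySem.Set.empty []).2

-- ===== PORT B =====
-- graph[n] of the SAME graph; pvLoop looks the adjacency up through mst (pure, same value
-- as building the dict once) because its termination measure needs the mst it came from.
def pvAdj (mst : List (Int × Int × Int)) (n : Int) : List Int :=
  (pvBuildGraph mst).getD n []

def pvEndpoints (mst : List (Int × Int × Int)) : Finset Int :=
  (mst.flatMap (fun e => [e.1, e.2.1])).toFinset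

-- characterisation of the built adjacency (needed by pvLoop's termination proof)
lemma pvBuildGraph_getD (mst : List (Int × Int × Int)) (d : PySem.Dict Int (List Int)) (n : Int) :
    (mst.foldl (fun g e => (g.modify e.1 [] (· ++ [e.2.1])).modify e.2.1 [] (· ++ [e.1])) d).getD n []
      = d.getD n [] ++ mst.flatMap
          (fun e => (if e.1 = n then [e.2.1] else []) ++ (if e.2.1 = n then [e.1] else [])) := by
  induction mst generalizing d with
  | nil => simp
  | cons e t ih =>
    simp only [List.foldl_cons, List.flatMap_cons]
    rw [ih]
    have hstep : ((d.modify e.1 [] (· ++ [e.2.1])).modify e.2.1 [] (· ++ [e.1])).getD n []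
        = d.getD n [] ++ ((if e.1 = n then [e.2.1] else []) ++ (if e.2.1 = n then [e.1] else [])) := by
      clear ih
      obtain ⟨u, w, c⟩ := e
      simp only [PySem.Dict.getD_modify]
      split_ifs <;> subst_vars <;> simp_all
    rw [hstep, List.append_assoc]

lemma pvAdj_eq (mst : List (Int × Int × Int)) (n : Int) :
    pvAdj mst n = mst.flatMap
      (fun e => (if e.1 = n then [e.2.1] else []) ++ (if e.2.1 = n then [e.1] else [])) := by
  simpa [pvAdj, pvBuildGraph] using pvBuildGraph_getD mst PySem.Dict.empty n

lemma pvAdj_nil (mst : List (Int × Int × Int)) (n : Int) (h : n ∉ pvEndpoints mst) :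
    pvAdj mst n = [] := by
  rw [pvAdj_eq, List.flatMap_eq_nil_iff]
  intro e he
  simp only [pvEndpoints, List.mem_toFinset, List.mem_flatMap] at h
  have h1 : e.1 ≠ n := fun hh => h ⟨e, he, by simp [hh]⟩
  have h2 : e.2.1 ≠ n := fun hh => h ⟨e, he, by simp [hh]⟩
  simp [h1, h2]

-- B's while-loop: pop, skip if visited, else mark+append and push reversed(graph[node]);
-- with the head of the list as the top of the stack, 'extend(reversed(graph[node]))'
-- is exactly prepending graph[node].
def pvLoop (mst : List (Int × Int × Int)) (v : PySem.Set Int) (p : List Int)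
    (stack : List Int) : List Int :=
  match stack with
  | [] => p
  | node :: rest =>
    if PySem.Set.contains v node then pvLoop mst v p rest
    else pvLoop mst (PySem.Set.add v node) (p ++ [node]) (pvAdj mst node ++ rest)
termination_by stack.length + ((pvEndpoints mst \ v.toFinset).sum fun u => (pvAdj mst u).length)
decreasing_by
  · simp only [List.length_cons]; omega
  · rename_i hc
    have hnv : node ∉ v := by simpa [PySem.Set.contains] using hc
    have hadd : (PySem.Set.add v node).toFinset = insert node v.toFinset := by
      simp [PySem.Set.add, PySem.Set.contains, hnv, List.toFinset_append]
    rw [hadd]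
    by_cases hn : node ∈ pvEndpoints mst
    · have hmem : node ∈ pvEndpoints mst \ v.toFinset := by
        simp [Finset.mem_sdiff, hn, List.mem_toFinset, hnv]
      rw [Finset.sdiff_insert, ← Finset.add_sum_erase _ _ hmem]
      simp only [List.length_append, List.length_cons]; omega
    · rw [pvAdj_nil mst node hn, Finset.sdiff_insert,
        Finset.erase_eq_of_notMem (fun hh => hn (Finset.mem_sdiff.mp hh).1)]
      simp only [List.nil_append, List.length_cons]; omega

def preorder_traversal_alt (mst : List (Int × Int × Int)) (start : Int) : List Int :=
  pvLoop mst PySem.Set.empty [] [start]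

-- ===== PRECONDITION & SPEC =====
def Spec_preorder_traversal (mst : List (Int × Int × Int)) (start : Int) (out : List Int) : Prop := out = preorder_traversal_alt mst start
instance (mst : List (Int × Int × Int)) (start : Int) (out : List Int) : Decidable (Spec_preorder_traversal mst start out) := by unfold Spec_preorder_traversal; infer_instance

-- ===== CLAIM (what is proved, stated in full; the proofs are below) =====
def Claim_equal_preorder_traversal : Prop := ∀ (mst : List (Int × Int × Int)) (start : Int), Dom_preorder_traversal mst start → Spec_preorder_traversal mst start (preorder_traversal mst start)

-- ===== LEMMAS AND PROOFS =====

-- the universe of nodes the traversal can ever touch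
def pvUni (mst : List (Int × Int × Int)) (start : Int) : Finset Int :=
  insert start (pvEndpoints mst)

lemma pvAdj_mem (mst : List (Int × Int × Int)) (n x : Int) (hx : x ∈ pvAdj mst n) :
    x ∈ pvEndpoints mst := by
  rw [pvAdj_eq] at hx
  simp only [List.mem_flatMap, List.mem_append] at hx
  obtain ⟨e, he, hx⟩ := hx
  simp only [pvEndpoints, List.mem_toFinset, List.mem_flatMap]
  refine ⟨e, he, ?_⟩
  rcases hx with hx | hx <;> split_ifs at hx <;> simp_all

lemma pv_mem_add (s : PySem.Set Int) (a x : Int) :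
    x ∈ PySem.Set.add s a ↔ x ∈ s ∨ x = a := by
  by_cases h : a ∈ s
  · rw [show PySem.Set.add s a = s from by simp [PySem.Set.add, PySem.Set.contains, h]]
    exact ⟨Or.inl, fun hh => hh.elim id (fun e => e ▸ h)⟩
  · rw [show PySem.Set.add s a = s ++ [a] from by simp [PySem.Set.add, PySem.Set.contains, h]]
    simp [List.mem_append]

-- visited only grows through A's dfs, and stays inside the universe
lemma pvDfsL_pres (mst : List (Int × Int × Int)) (start : Int) :
    ∀ f : Nat, ∀ ns v p,
      (∀ x ∈ v, x ∈ pvUni mst start) → (∀ x ∈ ns, x ∈ pvUni mst start) →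
      (∀ x ∈ v, x ∈ (pvDfsL (pvBuildGraph mst) f v p ns).1) ∧
      (∀ x ∈ (pvDfsL (pvBuildGraph mst) f v p ns).1, x ∈ pvUni mst start) := by
  intro f
  induction f using Nat.strong_induction_on with
  | _ f IHf =>
    intro ns
    induction ns with
    | nil => intro v p hv _; rw [pvDfsL]; exact ⟨fun x hx => hx, hv⟩
    | cons nb ns' IH =>
      intro v p hv hns
      rw [pvDfsL]
      by_cases hc : PySem.Set.contains v nb
      · simp only [hc]
        exact IH v p hv (fun x hx => hns x (List.mem_cons_of_mem _ hx))
      · simp only [hc]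
        have hnbU : nb ∈ pvUni mst start := hns nb List.mem_cons_self
        match f with
        | 0 =>
          rw [pvDfsA]
          exact IH v p hv (fun x hx => hns x (List.mem_cons_of_mem _ hx))
        | f' + 1 =>
          rw [pvDfsA]
          have hadd : ∀ x ∈ PySem.Set.add v nb, x ∈ pvUni mst start := by
            intro x hx
            rcases (pv_mem_add v nb x).mp hx with hx | rfl
            · exact hv x hx
            · exact hnbU
          have hadj : ∀ x ∈ (pvBuildGraph mst).getD nb [], x ∈ pvUni mst start := by
            intro x hx
            exact Finset.mem_insert_of_mem (pvAdj_mem mst nb x hx)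
          obtain ⟨hmono, hsub⟩ := IHf f' (Nat.lt_succ_self f')
            ((pvBuildGraph mst).getD nb []) (PySem.Set.add v nb) (p ++ [nb]) hadd hadj
          obtain ⟨hmono', hsub'⟩ := IH
            (pvDfsL (pvBuildGraph mst) f' (PySem.Set.add v nb) (p ++ [nb]) ((pvBuildGraph mst).getD nb [])).1
            (pvDfsL (pvBuildGraph mst) f' (PySem.Set.add v nb) (p ++ [nb]) ((pvBuildGraph mst).getD nb [])).2
            hsub (fun x hx => hns x (List.mem_cons_of_mem _ hx))
          refine ⟨fun x hx => hmono' x (hmono x ((pv_mem_add v nb x).mpr (Or.inl hx))), hsub'⟩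

-- the simulation lemma: B's stack loop run on ns ++ rest first computes exactly
-- A's dfs fold over ns, then continues with rest
lemma pvBridge (mst : List (Int × Int × Int)) (start : Int) :
    ∀ f : Nat, ∀ ns v p rest,
      (∀ x ∈ v, x ∈ pvUni mst start) → (∀ x ∈ ns, x ∈ pvUni mst start) →
      (pvUni mst start \ v.toFinset).card < f →
      pvLoop mst v p (ns ++ rest)
        = pvLoop mst (pvDfsL (pvBuildGraph mst) f v p ns).1
            (pvDfsL (pvBuildGraph mst) f v p ns).2 rest := by
  intro f
  induction f using Nat.strong_induction_on with
  | _ f IHf =>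
    intro ns
    induction ns with
    | nil => intro v p rest _ _ _; rw [pvDfsL]; rfl
    | cons nb ns' IH =>
      intro v p rest hv hns hcard
      rw [pvDfsL, List.cons_append, pvLoop]
      by_cases hc : PySem.Set.contains v nb
      · simp only [hc]
        exact IH v p rest hv (fun x hx => hns x (List.mem_cons_of_mem _ hx)) hcard
      · simp only [hc]
        have hnv : nb ∉ v := by simpa [PySem.Set.contains] using hc
        have hnbU : nb ∈ pvUni mst start := hns nb List.mem_cons_self
        cases f with
        | zero => omega
        | succ f' =>
          rw [pvDfsA]
          have hadd : ∀ x ∈ PySem.Set.add v nb, x ∈ pvUni mst start := by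
            intro x hx
            rcases (pv_mem_add v nb x).mp hx with hx | rfl
            · exact hv x hx
            · exact hnbU
          have hadj : ∀ x ∈ (pvBuildGraph mst).getD nb [], x ∈ pvUni mst start :=
            fun x hx => Finset.mem_insert_of_mem (pvAdj_mem mst nb x hx)
          have haddF : (PySem.Set.add v nb).toFinset = insert nb v.toFinset := by
            simp [PySem.Set.add, PySem.Set.contains, hnv, List.toFinset_append]
          have hmemd : nb ∈ pvUni mst start \ v.toFinset := by
            simp [Finset.mem_sdiff, hnbU, List.mem_toFinset, hnv]
          have hcard' : (pvUni mst start \ (PySem.Set.add v nb).toFinset).card < f' := by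
            rw [haddF, Finset.sdiff_insert, Finset.card_erase_of_mem hmemd]
            have hpos := Finset.card_pos.mpr ⟨nb, hmemd⟩
            omega
          have hstep := IHf f' (Nat.lt_succ_self f') ((pvBuildGraph mst).getD nb [])
            (PySem.Set.add v nb) (p ++ [nb]) (ns' ++ rest) hadd hadj hcard'
          have hAdjEq : pvAdj mst nb = (pvBuildGraph mst).getD nb [] := rfl
          rw [hAdjEq, hstep]
          obtain ⟨hmono, hsub⟩ := pvDfsL_pres mst start f' ((pvBuildGraph mst).getD nb [])
            (PySem.Set.add v nb) (p ++ [nb]) hadd hadj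
          have hcard'' :
              (pvUni mst start
                \ (pvDfsL (pvBuildGraph mst) f' (PySem.Set.add v nb) (p ++ [nb])
                    ((pvBuildGraph mst).getD nb [])).1.toFinset).card < f' + 1 := by
            have hsubF : pvUni mst start
                \ (pvDfsL (pvBuildGraph mst) f' (PySem.Set.add v nb) (p ++ [nb])
                    ((pvBuildGraph mst).getD nb [])).1.toFinset
                ⊆ pvUni mst start \ (PySem.Set.add v nb).toFinset := by
              intro x hx
              rw [Finset.mem_sdiff] at hx ⊢
              refine ⟨hx.1, fun hmem => hx.2 ?_⟩
              rw [List.mem_toFinset] at hmem ⊢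
              exact hmono x hmem
            have := Finset.card_le_card hsubF
            omega
          exact IH _ _ rest hsub (fun x hx => hns x (List.mem_cons_of_mem _ hx)) hcard''

lemma pv_flatMap_len (mst : List (Int × Int × Int)) :
    (mst.flatMap (fun e => [e.1, e.2.1])).length = 2 * mst.length := by
  induction mst with
  | nil => simp
  | cons e t ih => simp [ih]; omega

-- ===== VERDICT (by name: the statement is the Claim_ definition above) =====
theorem preorder_traversal_spec : Claim_equal_preorder_traversal := by
  unfold Claim_equal_preorder_traversal
  intro mst start _
  unfold Spec_preorder_traversal preorder_traversal preorder_traversal_alt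
  have hcard : (pvUni mst start \ (PySem.Set.empty : PySem.Set Int).toFinset).card
      < 2 * mst.length + 2 := by
    have h1 : (pvUni mst start).card ≤ (pvEndpoints mst).card + 1 :=
      Finset.card_insert_le _ _
    have h2 : (pvEndpoints mst).card ≤ 2 * mst.length := by
      have := List.toFinset_card_le (mst.flatMap (fun e => [e.1, e.2.1]))
      rw [pv_flatMap_len] at this
      exact this
    simp only [PySem.Set.empty, List.toFinset_nil, Finset.sdiff_empty]
    omega
  have h := pvBridge mst start (2 * mst.length + 2) [start] PySem.Set.empty [] []
    (by intro x hx; simp [PySem.Set.empty] at hx)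
    (by intro x hx; rw [List.mem_singleton] at hx; exact hx ▸ Finset.mem_insert_self _ _)
    hcard
  simp only [List.append_nil] at h
  rw [h, pvLoop]
  have hc : PySem.Set.contains (PySem.Set.empty : PySem.Set Int) start = false := by
    simp [PySem.Set.contains, PySem.Set.empty]
  rw [pvDfsL]
  simp only [hc, Bool.false_eq_true, if_false]
  rw [pvDfsL]
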